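-- pv_equiv track=rewrite | github.com/rurup2048/shiny-giggle | solve_hanoi.py | print_stacks
-- ===== SOURCE A (Python) =====
-- def print_stacks(position):
--     '''print_stacks(position) -> str
--     return string represent the stacks in position
--     '''
--     # get maximum height of the stacks
--     height = max([len(stack) for stack in position])
--     outString = '\n'  # output string -- start with newline
--
--     for level in range(height-1,-1,-1): # print from top to bottom
--         for stack in position:
--             if level < len(stack):
--                 outString += str(stack[level]) # print a disc
--             else:
--                 outString += ' '  # leave a space
--             outString += ' ' # go to the next stack
--         outString += '\n'   # go to the next row
--     outString += '- - -\n' # bases of the stacks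
--
--     return outString
-- ===== SOURCE B (Python) =====
-- def print_stacks(position):
--     '''print_stacks(position) -> str
--     return string represent the stacks in position
--     '''
--     height = max(len(stack) for stack in position)
--     # pad every stack to `height` cells, then transpose and emit rows top-down
--     padded = [[str(disc) for disc in stack] + [' '] * (height - len(stack))
--               for stack in position]
--     rows = [''.join(cell + ' ' for cell in row) for row in zip(*padded)]
--     return '\n' + ''.join(row + '\n' for row in reversed(rows)) + '- - -\n'
-- ===== Notes on version B (the rewrite author's own statement) =====
-- stated objective: simpler
-- what changed: Replaces the per-cell `level < len(stack)` boundary test inside nested accumulator loops by padding every stack to the common height first, transposing with zip, and joining rows with comprehensions.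
-- outside the precondition, e.g. on print_stacks([]): A raises ValueError, B raises ValueError
import Mathlib
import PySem

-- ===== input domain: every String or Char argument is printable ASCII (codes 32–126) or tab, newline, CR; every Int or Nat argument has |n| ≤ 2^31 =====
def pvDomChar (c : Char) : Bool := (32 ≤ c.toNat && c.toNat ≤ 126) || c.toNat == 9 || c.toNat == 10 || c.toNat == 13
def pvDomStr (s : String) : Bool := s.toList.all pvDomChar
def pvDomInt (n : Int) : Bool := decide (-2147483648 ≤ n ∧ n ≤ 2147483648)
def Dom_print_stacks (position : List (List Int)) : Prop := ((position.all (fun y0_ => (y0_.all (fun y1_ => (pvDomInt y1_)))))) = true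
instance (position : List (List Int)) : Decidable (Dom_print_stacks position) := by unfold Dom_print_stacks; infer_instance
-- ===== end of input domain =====

-- B pads every stack to the common height and transposes, instead of A's per-cell
-- `level < len(stack)` test inside nested accumulator loops (objective: simpler).
-- Strings are built on the List Char side (String.ofList at the end), since Lean's own
-- String.append is opaque to the kernel; the character sequences are exact.

-- ===== PORT A =====
-- one cell of A's inner loop: the `if level < len(stack)` branch plus the `+= ' '`
def print_stacks (position : List (List Int)) : String :=
  -- height = max([len(stack) for stack in position]); Python max raises ValueError on [] (excluded by Pre_)
  match PySem.List.max? (position.map (fun stack => (stack.length : Int))) (fun x => x) with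
  | none => ""
  | some height =>
    let out : List Char :=
      (PySem.List.pyRange (height - 1) (-1) (-1)).foldl (fun out level =>
        (position.foldl (fun out stack =>
          (out ++ (if level < (stack.length : Int) then
                     match PySem.List.pyGet? stack level with
                     | some d => PySem.Int.toChars d
                     | none => []          -- unreachable: level < len(stack)
                   else [' '])) ++ [' ']) out) ++ ['\n'])
        ['\n']
    String.ofList (out ++ ['-', ' ', '-', ' ', '-', '\n'])

-- ===== PORT B =====
def print_stacks_alt (position : List (List Int)) : String :=
  match PySem.List.max? (position.map (fun stack => (stack.length : Int))) (fun x => x) with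
  | none => ""
  | some h =>
    let height := h.toNat
    let padded := position.map (fun s =>
      s.map PySem.Int.toChars ++ List.replicate (height - s.length) [' '])
    -- zip(*padded): row i of the transpose is the i-th cell of every padded column
    let rows := (List.range height).map (fun i =>
      ((padded.map (fun col => col.getD i [])).map (fun c => c ++ [' '])).flatten)
    String.ofList ('\n' :: (rows.reverse.map (fun r => r ++ ['\n'])).flatten ++ ['-', ' ', '-', ' ', '-', '\n'])

-- ===== PRECONDITION & SPEC =====
-- Pre_ excludes only position = [], where Python's max([]) raises ValueError in both A and B.
def Pre_print_stacks (position : List (List Int)) : Prop := position ≠ []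
instance (position : List (List Int)) : Decidable (Pre_print_stacks position) := by
  unfold Pre_print_stacks; infer_instance
def pvWitness_print_stacks : List (List Int) := [[3, 2, 1], [], []]

def Spec_print_stacks (position : List (List Int)) (out : String) : Prop := out = print_stacks_alt position
instance (position : List (List Int)) (out : String) : Decidable (Spec_print_stacks position out) := by unfold Spec_print_stacks; infer_instance

-- ===== CLAIM (what is proved, stated in full; the proofs are below) =====
def Claim_equal_print_stacks : Prop := ∀ (position : List (List Int)), Dom_print_stacks position → Pre_print_stacks position → Spec_print_stacks position (print_stacks position)

-- ===== LEMMAS AND PROOFS =====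

theorem foldl_chars_append {α : Type} (f : α → List Char) (xs : List α) (a : List Char) :
    xs.foldl (fun a x => a ++ f x) a = a ++ (xs.map f).flatten := by
  induction xs generalizing a with
  | nil => simp
  | cons x t ih => simp [List.foldl_cons, ih, List.append_assoc]

theorem cell_eq (H : Nat) (s : List Int) (i : Nat) (hi : i < H) (hs : s.length ≤ H) :
    ((if (i : Int) < (s.length : Int) then
        match PySem.List.pyGet? s (i : Int) with
        | some d => PySem.Int.toChars d
        | none => ([] : List Char)
      else [' ']) ++ [' ']) =
    (s.map PySem.Int.toChars ++ List.replicate (H - s.length) [' ']).getD i [] ++ [' '] := by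
  by_cases h : i < s.length
  · have hlt : ((i : Int)) < (s.length : Int) := by exact_mod_cast h
    rw [if_pos hlt, PySem.List.pyGet?_natCast]
    simp [List.getD, List.getElem?_append_left, h]
  · have h' : ¬ ((i : Int)) < (s.length : Int) := by exact_mod_cast h
    rw [if_neg h']
    have hsl : s.length ≤ i := Nat.le_of_not_lt h
    have hrep : i - s.length < H - s.length := by omega
    rw [List.getD, List.getElem?_append_right (by simpa using hsl)]
    simp [hrep]

theorem print_stacks_spec_aux (position : List (List Int)) (hne : position ≠ []) :
    print_stacks position = print_stacks_alt position := by
  unfold print_stacks print_stacks_alt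
  cases hmax : PySem.List.max? (position.map (fun stack => (stack.length : Int))) (fun x => x) with
  | none =>
    exfalso
    rw [PySem.List.max?_eq_none_iff] at hmax
    exact hne (by simpa using hmax)
  | some h =>
    simp only
    -- h is one of the lengths, hence 0 ≤ h and (h.toNat : Int) = h
    have hmem : h ∈ position.map (fun stack => (stack.length : Int)) :=
      PySem.List.max?_mem hmax
    have hge : 0 ≤ h := by
      obtain ⟨s, _, hs⟩ := List.mem_map.mp hmem
      omega
    have hcast : ((h.toNat : Int)) = h := Int.toNat_of_nonneg hge
    have hmaxall : ∀ s ∈ position, (s.length : Int) ≤ h := by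
      intro s hs
      have := PySem.List.max?_isMax hmax ((s.length : Int))
        (List.mem_map.mpr ⟨s, hs, rfl⟩)
      simpa using this
    set H := h.toNat with hH
    -- canonical forms of both folds
    have hinner : ∀ level : Int, ∀ out : List Char,
        position.foldl (fun out stack =>
          (out ++ (if level < (stack.length : Int) then
                     match PySem.List.pyGet? stack level with
                     | some d => PySem.Int.toChars d
                     | none => []
                   else [' '])) ++ [' ']) out
        = out ++ (position.map (fun stack =>
            (if level < (stack.length : Int) then
               match PySem.List.pyGet? stack level with
               | some d => PySem.Int.toChars d
               | none => []
             else [' ']) ++ [' '])).flatten := by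
      intro level out
      rw [← foldl_chars_append]
      apply PySem.List.foldl_congr_mem
      intro a s _; simp [List.append_assoc]
    have houter :
        (PySem.List.pyRange (h - 1) (-1) (-1)).foldl (fun out level =>
          (position.foldl (fun out stack =>
            (out ++ (if level < (stack.length : Int) then
                       match PySem.List.pyGet? stack level with
                       | some d => PySem.Int.toChars d
                       | none => []
                     else [' '])) ++ [' ']) out) ++ ['\n'])
          ['\n']
        = ['\n'] ++ ((PySem.List.pyRange (h - 1) (-1) (-1)).map (fun level =>
            (position.map (fun stack =>
              (if level < (stack.length : Int) then
                 match PySem.List.pyGet? stack level with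
                 | some d => PySem.Int.toChars d
                 | none => []
               else [' ']) ++ [' '])).flatten ++ ['\n'])).flatten := by
      rw [← foldl_chars_append]
      apply PySem.List.foldl_congr_mem
      intro a lvl _
      rw [hinner lvl a]
      simp [List.append_assoc]
    rw [houter]
    -- the countdown range is the reverse of range(0, h)
    have hrange : PySem.List.pyRange (h - 1) (-1) (-1)
        = ((List.range H).map (fun (k : Nat) => (k : Int))).reverse := by
      rw [PySem.List.pyRange_neg_one_eq_reverse]
      have e1 : (-1 : Int) + 1 = 0 := by norm_num
      have e2 : h - 1 + 1 = h := by ring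
      rw [e1, e2, ← hcast, PySem.List.pyRange_zero_nat]
    -- rows agree pointwise
    have hrows : (List.range H).map ((fun level =>
            (position.map (fun stack =>
              (if level < (stack.length : Int) then
                 match PySem.List.pyGet? stack level with
                 | some d => PySem.Int.toChars d
                 | none => []
               else [' ']) ++ [' '])).flatten ++ ['\n']) ∘ (fun (k : Nat) => (k : Int)))
        = (List.range H).map (fun i =>
            ((position.map (fun s =>
                s.map PySem.Int.toChars ++ List.replicate (H - s.length) [' '])).map
              (fun col => (col.getD i []) ++ [' '])).flatten ++ ['\n']) := by
      apply List.map_congr_left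
      intro i hi
      have hiH : i < H := List.mem_range.mp hi
      simp only [Function.comp]
      congr 1
      rw [List.map_map]
      congr 1
      apply List.map_congr_left
      intro s hs
      have hsH : s.length ≤ H := by
        have := hmaxall s hs
        omega
      simpa using cell_eq H s i hiH hsH
    rw [hrange, List.map_reverse, List.map_map, hrows]
    simp only [List.map_reverse, List.map_map, Function.comp_def, List.getD,
      List.cons_append, List.nil_append]

-- ===== VERDICT (by name: the statement is the Claim_ definition above) =====
theorem print_stacks_spec : Claim_equal_print_stacks := by
  intro position _ hpre
  unfold Spec_print_stacks
  exact print_stacks_spec_aux position hpre
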